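-- pv_equiv track=rewrite | github.com/jigglypop/- | 2020/11/1115/1517.py | relation_convert
-- ===== SOURCE A (Python) =====
-- def relation_convert(arr):
--     sort_arr = sorted(arr)
--     mid = dict().fromkeys(sort_arr, 0)
--     res = []
--     visited = [False] * (len(arr) + 1)
--     for idx, temp in enumerate(mid):
--         mid[temp] = idx + 1
--     for i in arr:
--         if visited[mid[i]] == False:
--             res.append(mid[i])
--             visited[mid[i]] = True
--     return res
-- ===== SOURCE B (Python) =====
-- def relation_convert(arr):
--     # argsort the first-occurrence distinct values and scatter ranks back by position
--     unique = list(dict.fromkeys(arr))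
--     order = sorted(range(len(unique)), key=lambda i: unique[i])
--     res = [0] * len(unique)
--     for rank, i in enumerate(order, 1):
--         res[i] = rank
--     return res
-- ===== Notes on version B (the rewrite author's own statement) =====
-- stated objective: alternative
-- what changed: B dedups first, argsorts only the distinct values and scatters ranks into the result by position, instead of sorting all elements and ranking every element through a value-to-rank dict guarded by a visited array.
import Mathlib
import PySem

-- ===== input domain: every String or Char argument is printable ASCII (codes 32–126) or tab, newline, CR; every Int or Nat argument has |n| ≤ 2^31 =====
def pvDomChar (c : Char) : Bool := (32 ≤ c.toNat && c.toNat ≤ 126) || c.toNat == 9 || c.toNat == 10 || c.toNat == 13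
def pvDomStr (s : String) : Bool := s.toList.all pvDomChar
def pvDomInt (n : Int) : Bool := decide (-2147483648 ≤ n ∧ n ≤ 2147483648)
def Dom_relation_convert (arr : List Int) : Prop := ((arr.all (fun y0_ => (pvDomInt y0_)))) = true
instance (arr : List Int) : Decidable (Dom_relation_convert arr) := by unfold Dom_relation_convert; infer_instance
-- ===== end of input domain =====

-- B replaces A's full sort + value-to-rank dict + visited array by a dedup-first argsort:
-- it sorts only the distinct values and scatters ranks back by position (objective:
-- alternative).


-- ===== PORT A =====
-- sort_arr = sorted(arr)
def pvSortA (arr : List Int) : List Int := PySem.List.sorted arr (fun x => x)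

-- mid = dict().fromkeys(sort_arr, 0)  (insert every key with value 0, first-occurrence order)
def pvMid0A (arr : List Int) : PySem.Dict Int Int :=
  (pvSortA arr).foldl (fun d k => d.insert k 0) PySem.Dict.empty

-- for idx, temp in enumerate(mid): mid[temp] = idx + 1   (iterates the keys; keys unchanged)
def pvMidA (arr : List Int) : PySem.Dict Int Int :=
  (PySem.List.enumerate (pvMid0A arr).keys).foldl
    (fun d (p : Int × Int) => d.insert p.2 (p.1 + 1)) (pvMid0A arr)

-- res = []; visited = [False] * (len(arr) + 1); for i in arr: …
-- mid[i]: the key is always present (i ∈ arr ⊆ keys), so getD never yields its default;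
-- visited[mid[i]]: the index is always in range (1 ≤ mid[i] ≤ #distinct ≤ len(arr)),
-- so pyGetD/pySetD coincide with Python's visited[…] read/assignment.
def relation_convert (arr : List Int) : List Int :=
  (arr.foldl
    (fun (st : List Int × List Bool) i =>
      if PySem.List.pyGetD st.2 ((pvMidA arr).getD i 0) false = false then
        (st.1 ++ [(pvMidA arr).getD i 0],
         PySem.List.pySetD st.2 ((pvMidA arr).getD i 0) true)
      else st)
    ([], List.replicate (arr.length + 1) false)).1

-- ===== PORT B =====
-- unique = list(dict.fromkeys(arr))
-- order = sorted(range(len(unique)), key=lambda i: unique[i])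
-- res = [0] * len(unique)
-- for rank, i in enumerate(order, 1): res[i] = rank
-- unique[i] in the sort key and res[i] = rank: i is always a position of unique, so
-- pyGetD never yields its default and pySetD coincides with Python's assignment.
def relation_convert_alt (arr : List Int) : List Int :=
  (PySem.List.enumerate
      (PySem.List.sorted (PySem.List.pyRange 0 (PySem.List.len (PySem.List.dedup arr)) 1)
        (fun i => PySem.List.pyGetD (PySem.List.dedup arr) i 0)) 1).foldl
    (fun res (p : Int × Int) => PySem.List.pySetD res p.2 p.1)
    (List.replicate (PySem.List.dedup arr).length 0)

-- ===== PRECONDITION & SPEC =====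
def Spec_relation_convert (arr : List Int) (out : List Int) : Prop := out = relation_convert_alt arr
instance (arr : List Int) (out : List Int) : Decidable (Spec_relation_convert arr out) := by unfold Spec_relation_convert; infer_instance

-- ===== CLAIM (what is proved, stated in full; the proofs are below) =====
def Claim_equal_relation_convert : Prop := ∀ (arr : List Int), Dom_relation_convert arr → Spec_relation_convert arr (relation_convert arr)

-- ===== LEMMAS AND PROOFS =====

-- number of distinct values of arr smaller than x
def pvCnt (arr : List Int) (x : Int) : Nat :=
  (PySem.Set.ofList arr).countP (fun v => decide (v < x))

-- PySem.Set.ofList keeps a subsequence of its input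
lemma pv_ofList_sublist (xs : List Int) : (PySem.Set.ofList xs).Sublist xs := by
  induction xs using List.reverseRecOn with
  | nil => simp [PySem.Set.ofList, PySem.Set.empty]
  | append_singleton xs x ih =>
      rw [PySem.Set.ofList_append]
      simp only [PySem.Set.update, List.foldl_cons, List.foldl_nil, PySem.Set.add]
      split
      · exact ih.trans (List.sublist_append_left xs [x])
      · exact ih.append (List.Sublist.refl [x])

-- a set is a prefix of any of its updates
lemma pv_prefix_update (s : PySem.Set Int) (l : List Int) : s <+: PySem.Set.update s l := by
  induction l generalizing s with
  | nil => simp [PySem.Set.update]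
  | cons i l ih =>
      have h1 : s <+: PySem.Set.add s i := by
        simp only [PySem.Set.add]
        split
        · exact List.prefix_refl s
        · exact List.prefix_append s [i]
      exact h1.trans (ih (PySem.Set.add s i))

lemma pv_ofList_append_singleton_mem (p : List Int) (i : Int) (h : i ∈ p) :
    PySem.Set.ofList (p ++ [i]) = PySem.Set.ofList p := by
  rw [PySem.Set.ofList_append]
  simp only [PySem.Set.update, List.foldl_cons, List.foldl_nil, PySem.Set.add, PySem.Set.contains]
  simp [PySem.Set.mem_ofList, h]

lemma pv_ofList_append_singleton_not_mem (p : List Int) (i : Int) (h : i ∉ p) :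
    PySem.Set.ofList (p ++ [i]) = PySem.Set.ofList p ++ [i] := by
  rw [PySem.Set.ofList_append]
  simp only [PySem.Set.update, List.foldl_cons, List.foldl_nil, PySem.Set.add, PySem.Set.contains]
  simp [PySem.Set.mem_ofList, h]

-- the rank-assignment fold: keys not mentioned keep their value …
lemma pv_fold_getD_not_mem (ps : List (Int × Int)) (d : PySem.Dict Int Int) (x : Int)
    (h : x ∉ ps.map Prod.snd) :
    (ps.foldl (fun d (p : Int × Int) => d.insert p.2 (p.1 + 1)) d).getD x 0 = d.getD x 0 := by
  induction ps generalizing d with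
  | nil => rfl
  | cons q ps ih =>
      simp only [List.map_cons, List.mem_cons, not_or] at h
      rw [List.foldl_cons, ih _ h.2, PySem.Dict.getD_insert_of_ne _ _ _ h.1]

-- … and a key listed once gets its listed rank
lemma pv_fold_getD_mem (ps : List (Int × Int)) (d : PySem.Dict Int Int) (i x : Int)
    (hnd : (ps.map Prod.snd).Nodup) (hm : (i, x) ∈ ps) :
    (ps.foldl (fun d (p : Int × Int) => d.insert p.2 (p.1 + 1)) d).getD x 0 = i + 1 := by
  induction ps generalizing d with
  | nil => cases hm
  | cons q ps ih =>
      simp only [List.map_cons, List.nodup_cons] at hnd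
      rcases List.mem_cons.mp hm with h | h
      · subst h
        rw [List.foldl_cons, pv_fold_getD_not_mem _ _ _ hnd.1, PySem.Dict.getD_insert_self]
      · have hx : x ∈ ps.map Prod.snd := List.mem_map.mpr ⟨(i, x), h, rfl⟩
        have : q.2 ≠ x := fun he => hnd.1 (he ▸ hx)
        rw [List.foldl_cons]
        exact ih _ hnd.2 h

-- in a strictly increasing list, the index of an element is the number of smaller elements
lemma pv_countP_lt_of_pairwise (l : List Int) (hp : l.Pairwise (· < ·)) :
    ∀ (k : Nat) (hk : k < l.length), l.countP (fun v => decide (v < l[k])) = k := by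
  induction l with
  | nil => intro k hk; simp at hk
  | cons a t ih =>
      rw [List.pairwise_cons] at hp
      intro k hk
      cases k with
      | zero =>
          have h0 : t.countP (fun v => decide (v < a)) = 0 := by
            rw [List.countP_eq_zero]
            intro v hv
            simp only [decide_eq_true_eq]
            exact not_lt.mpr (le_of_lt (hp.1 v hv))
          simp only [List.getElem_cons_zero, List.countP_cons, lt_self_iff_false, decide_false,
            Bool.false_eq_true, if_false, Nat.add_zero]
          exact h0
      | succ k =>
          simp only [List.length_cons, Nat.succ_lt_succ_iff] at hk
          have ha : a < t[k] := hp.1 _ (List.getElem_mem hk)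
          have hih := ih hp.2 k hk
          simp only [List.getElem_cons_succ, List.countP_cons, ha, decide_true, if_true]
          exact congrArg (· + 1) hih

-- the distinct values of sorted(arr) are strictly increasing
lemma pv_pairwise_D (arr : List Int) :
    (PySem.Set.ofList (pvSortA arr)).Pairwise (· < ·) := by
  have hle : (PySem.Set.ofList (pvSortA arr)).Pairwise (· ≤ ·) :=
    (PySem.List.sorted_pairwise arr (fun x => x)).sublist (pv_ofList_sublist _)
  have hnd : (PySem.Set.ofList (pvSortA arr)).Nodup := PySem.Set.nodup_ofList _
  exact (hle.and hnd).imp (fun h => lt_of_le_of_ne h.1 h.2)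

-- distinct-of-sorted is a permutation of distinct-of-arr
lemma pv_perm_D_E (arr : List Int) :
    (PySem.Set.ofList (pvSortA arr)).Perm (PySem.Set.ofList arr) := by
  rw [List.perm_ext_iff_of_nodup (PySem.Set.nodup_ofList _) (PySem.Set.nodup_ofList _)]
  intro a
  simp [PySem.Set.mem_ofList, pvSortA, PySem.List.mem_sorted]

-- the assembled dict: mid[x] = pvCnt arr x + 1, and pvCnt arr x is x's index in the sorted distinct list
lemma pv_mid_spec (arr : List Int) (x : Int) (hx : x ∈ arr) :
    ∃ (hk : pvCnt arr x < (PySem.Set.ofList (pvSortA arr)).length),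
      (PySem.Set.ofList (pvSortA arr))[pvCnt arr x] = x ∧
      (pvMidA arr).getD x 0 = ((pvCnt arr x : Nat) : Int) + 1 := by
  have hxD : x ∈ PySem.Set.ofList (pvSortA arr) := by
    simp [PySem.Set.mem_ofList, pvSortA, PySem.List.mem_sorted, hx]
  obtain ⟨k, hk⟩ := Option.isSome_iff_exists.mp
    ((PySem.List.index?_isSome_iff _ x).mpr hxD)
  obtain ⟨hklt, hge, _⟩ := PySem.List.getElem_of_index?_eq_some hk
  have hcnt : pvCnt arr x = k := by
    have h1 := pv_countP_lt_of_pairwise _ (pv_pairwise_D arr) k hklt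
    rw [hge] at h1
    have h2 : (PySem.Set.ofList (pvSortA arr)).countP (fun v => decide (v < x)) =
        (PySem.Set.ofList arr).countP (fun v => decide (v < x)) :=
      (pv_perm_D_E arr).countP_eq _
    unfold pvCnt
    rw [← h2, h1]
  have hkeys : (pvMid0A arr).keys = PySem.Set.ofList (pvSortA arr) := by
    unfold pvMid0A
    rw [PySem.Dict.keys_foldl_insert, PySem.Dict.keys_empty, PySem.Set.update_nil_left]
  have hmem : ((k : Int), x) ∈ PySem.List.enumerate (pvMid0A arr).keys 0 := by
    rw [hkeys, PySem.List.mem_enumerate_iff]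
    exact ⟨k, hklt, by simp [hge]⟩
  have hnd : ((PySem.List.enumerate (pvMid0A arr).keys 0).map Prod.snd).Nodup := by
    rw [hkeys]
    have := PySem.List.map_snd_enumerate (PySem.Set.ofList (pvSortA arr)) 0
    simp only [this]
    · exact PySem.Set.nodup_ofList _
  have hmid : (pvMidA arr).getD x 0 = (k : Int) + 1 :=
    pv_fold_getD_mem _ _ _ _ hnd hmem
  subst hcnt
  exact ⟨hklt, hge, hmid⟩

lemma pv_rank_inj (arr : List Int) (x y : Int) (hx : x ∈ arr) (hy : y ∈ arr)
    (h : pvCnt arr x = pvCnt arr y) : x = y := by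
  obtain ⟨hkx, hgx, _⟩ := pv_mid_spec arr x hx
  obtain ⟨hky, hgy, _⟩ := pv_mid_spec arr y hy
  rw [← hgx, ← hgy]
  simp [h]

lemma pv_rank_bound (arr : List Int) (x : Int) (hx : x ∈ arr) :
    pvCnt arr x + 1 < arr.length + 1 := by
  obtain ⟨hk, _, _⟩ := pv_mid_spec arr x hx
  have h1 : (PySem.Set.ofList (pvSortA arr)).length ≤ (pvSortA arr).length :=
    (pv_ofList_sublist _).length_le
  have h2 : (pvSortA arr).length = arr.length := PySem.List.length_sorted _ _ _
  omega

-- the dedup/visited loop of A, run over any suffix l after a processed prefix p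
lemma pv_loopA (arr : List Int) (rk : Int → Nat)
    (hinj : ∀ x ∈ arr, ∀ y ∈ arr, rk x = rk y → x = y)
    (hbd : ∀ x ∈ arr, rk x < arr.length + 1) :
    ∀ (l : List Int), (∀ x ∈ l, x ∈ arr) →
    ∀ (p : List Int) (res : List Int) (vis : List Bool),
      (∀ x ∈ p, x ∈ arr) →
      vis.length = arr.length + 1 →
      (∀ x ∈ arr, PySem.List.pyGetD vis ((rk x : Nat) : Int) false = decide (x ∈ p)) →
      (l.foldl
        (fun (st : List Int × List Bool) i =>
          if PySem.List.pyGetD st.2 ((rk i : Nat) : Int) false = false then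
            (st.1 ++ [((rk i : Nat) : Int)], PySem.List.pySetD st.2 ((rk i : Nat) : Int) true)
          else st)
        (res, vis)).1
      = res ++ ((PySem.Set.ofList (p ++ l)).drop (PySem.Set.ofList p).length).map
          (fun x => ((rk x : Nat) : Int)) := by
  intro l
  induction l with
  | nil => intro _ p res vis _ _ _; simp
  | cons i l ih =>
      intro hl p res vis hp hlen hvis
      have hiarr : i ∈ arr := hl i (List.mem_cons_self)
      rw [List.foldl_cons]
      by_cases hip : i ∈ p
      · -- already seen: visited[rk i] is true, state unchanged
        have hv : PySem.List.pyGetD vis ((rk i : Nat) : Int) false = true := by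
          rw [hvis i hiarr]; simp [hip]
        rw [hv]
        simp only [Bool.true_eq_false, if_false]
        have hstep := ih (fun x hx => hl x (List.mem_cons_of_mem _ hx)) (p ++ [i]) res vis
          (by intro x hx
              rcases List.mem_append.mp hx with h | h
              · exact hp x h
              · simpa using (List.mem_singleton.mp h) ▸ hiarr)
          hlen
          (by intro x hxa
              rw [hvis x hxa]
              have : (x ∈ p ++ [i]) ↔ (x ∈ p) := by
                simp only [List.mem_append, List.mem_singleton]
                constructor
                · rintro (h | rfl)
                  · exact h
                  · exact hip
                · exact Or.inl
              simp [this])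
        rw [pv_ofList_append_singleton_mem p i hip] at hstep
        simp only [List.append_assoc, List.singleton_append] at hstep
        exact hstep
      · -- first occurrence: append rank, mark visited
        have hv : PySem.List.pyGetD vis ((rk i : Nat) : Int) false = false := by
          rw [hvis i hiarr]; simp [hip]
        rw [hv]
        simp only [if_true]
        have hlen' : (PySem.List.pySetD vis ((rk i : Nat) : Int) true).length = arr.length + 1 := by
          rw [PySem.List.length_pySetD, hlen]
        have hvis' : ∀ x ∈ arr,
            PySem.List.pyGetD (PySem.List.pySetD vis ((rk i : Nat) : Int) true)
              ((rk x : Nat) : Int) false = decide (x ∈ p ++ [i]) := by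
          intro x hxa
          rw [PySem.List.pyGetD_pySetD_natCast vis (rk i) (rk x) true false
            (by rw [hlen]; exact hbd i hiarr)]
          by_cases hxe : rk x = rk i
          · have hxi : x = i := hinj x hxa i hiarr hxe
            subst hxi
            simp
          · have hxni : x ≠ i := fun he => hxe (he ▸ rfl)
            rw [if_neg hxe, hvis x hxa]
            have : (x ∈ p ++ [i]) ↔ (x ∈ p) := by
              simp only [List.mem_append, List.mem_singleton]
              constructor
              · rintro (h | h)
                · exact h
                · exact absurd h hxni
              · exact Or.inl
            simp [this]
        have hstep := ih (fun x hx => hl x (List.mem_cons_of_mem _ hx)) (p ++ [i])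
          (res ++ [((rk i : Nat) : Int)]) (PySem.List.pySetD vis ((rk i : Nat) : Int) true)
          (by intro x hx
              rcases List.mem_append.mp hx with h | h
              · exact hp x h
              · simpa using (List.mem_singleton.mp h) ▸ hiarr)
          hlen' hvis'
        -- ofList (p ++ [i]) = ofList p ++ [i] is a prefix of ofList (p ++ (i :: l))
        obtain ⟨t, ht⟩ := pv_prefix_update (PySem.Set.ofList (p ++ [i])) l
        have hofl : PySem.Set.ofList (p ++ i :: l) = PySem.Set.ofList p ++ [i] ++ t := by
          have h2 : p ++ i :: l = (p ++ [i]) ++ l := by simp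
          rw [h2, PySem.Set.ofList_append, ← ht, pv_ofList_append_singleton_not_mem p i hip]
        rw [pv_ofList_append_singleton_not_mem p i hip] at hstep
        simp only [List.append_assoc, List.singleton_append] at hstep hofl
        rw [hstep, hofl]
        have hre : PySem.Set.ofList p ++ i :: t = (PySem.Set.ofList p ++ [i]) ++ t := by simp
        rw [hre, List.drop_left]
        conv_rhs => rw [List.append_assoc, List.drop_left]
        simp

-- ----- B side -----

-- positions of a scatter loop that are never written keep their value …
lemma pv_scatter_not_mem (ps : List (Int × Int)) :
    ∀ (res : List Int) (j : Nat),
      (∀ p ∈ ps, ∃ k : Nat, k < res.length ∧ p.2 = (k : Int)) →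
      ((j : Int) ∉ ps.map Prod.snd) →
      PySem.List.pyGetD
          (ps.foldl (fun res (p : Int × Int) => PySem.List.pySetD res p.2 p.1) res) ((j : Int)) 0
        = PySem.List.pyGetD res ((j : Int)) 0 := by
  induction ps with
  | nil => intro res j _ _; rfl
  | cons q tl ih =>
      intro res j hin hj
      simp only [List.map_cons, List.mem_cons, not_or] at hj
      obtain ⟨k, hk, hq2⟩ := hin q List.mem_cons_self
      have hjk : j ≠ k := fun he => hj.1 (by rw [hq2, he])
      rw [List.foldl_cons,
          ih _ j
            (by intro p hp
                obtain ⟨k', hk', h2⟩ := hin p (List.mem_cons_of_mem _ hp)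
                exact ⟨k', by rwa [PySem.List.length_pySetD], h2⟩)
            hj.2,
          hq2, PySem.List.pyGetD_pySetD_natCast res k j q.1 0 hk]
      simp [hjk]

-- … and a position written exactly once holds the written rank
lemma pv_scatter_mem (ps : List (Int × Int)) :
    ∀ (res : List Int) (j : Nat) (r : Int),
      (∀ p ∈ ps, ∃ k : Nat, k < res.length ∧ p.2 = (k : Int)) →
      (ps.map Prod.snd).Nodup → ((r, (j : Int)) ∈ ps) →
      PySem.List.pyGetD
          (ps.foldl (fun res (p : Int × Int) => PySem.List.pySetD res p.2 p.1) res) ((j : Int)) 0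
        = r := by
  induction ps with
  | nil => intro _ _ _ _ _ hm; cases hm
  | cons q tl ih =>
      intro res j r hin hnd hm
      simp only [List.map_cons, List.nodup_cons] at hnd
      rcases List.mem_cons.mp hm with h | h
      · subst h
        have hlen : j < res.length := by
          obtain ⟨k, hk, h2⟩ := hin (r, (j : Int)) List.mem_cons_self
          have h2' : ((j : Int)) = (k : Int) := h2
          have : j = k := by exact_mod_cast h2'
          omega
        rw [List.foldl_cons,
            pv_scatter_not_mem tl _ j
              (by intro p hp
                  obtain ⟨k', hk', h2⟩ := hin p (List.mem_cons_of_mem _ hp)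
                  exact ⟨k', by rwa [PySem.List.length_pySetD], h2⟩)
              hnd.1,
            PySem.List.pyGetD_pySetD_natCast res j j r 0 hlen]
        simp
      · have hq2 : q.2 ≠ (j : Int) := by
          intro he
          exact hnd.1 (he ▸ List.mem_map.mpr ⟨(r, (j : Int)), h, rfl⟩)
        rw [List.foldl_cons]
        exact ih _ j r
          (by intro p hp
              obtain ⟨k', hk', h2⟩ := hin p (List.mem_cons_of_mem _ hp)
              exact ⟨k', by rwa [PySem.List.length_pySetD], h2⟩)
          hnd.2 h

lemma pv_scatter_length (ps : List (Int × Int)) : ∀ (res : List Int),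
    (ps.foldl (fun res (p : Int × Int) => PySem.List.pySetD res p.2 p.1) res).length
      = res.length := by
  induction ps with
  | nil => intro res; rfl
  | cons q tl ih => intro res; rw [List.foldl_cons, ih, PySem.List.length_pySetD]

-- sorting the distinct values equals dedup of the sorted list
lemma pv_sortedU_eq_D (arr : List Int) :
    PySem.List.sorted (PySem.Set.ofList arr) (fun x => x)
      = PySem.Set.ofList (pvSortA arr) :=
  PySem.List.sorted_eq_of_perm_of_pairwise_lt _ _ _ (pv_perm_D_E arr) (pv_pairwise_D arr)

-- the sort key of B reads back the distinct value at an index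
lemma pv_key_cast (arr : List Int) (x : Int) (hx : x ∈ PySem.Set.ofList arr) :
    PySem.List.pyGetD (PySem.Set.ofList arr)
        ((List.idxOf x (PySem.Set.ofList arr) : Nat) : Int) 0 = x := by
  rw [PySem.List.pyGetD_natCast,
      List.getD_eq_getElem _ _ (List.idxOf_lt_length_of_mem hx),
      List.getElem_idxOf]

-- dedup maps through idxOf onto exactly the index range
lemma pv_map_idx_eq_range (arr : List Int) :
    (PySem.Set.ofList arr).map
        (fun x => ((List.idxOf x (PySem.Set.ofList arr) : Nat) : Int))
      = List.map (fun k : Nat => (k : Int)) (List.range (PySem.Set.ofList arr).length) := by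
  apply List.ext_getElem (by simp)
  intro j h1 h2
  simp [List.Nodup.idxOf_getElem (PySem.Set.nodup_ofList arr)]

-- B's argsort names the indices of the sorted distinct values inside unique
lemma pv_order_eq (arr : List Int) :
    PySem.List.sorted (PySem.List.pyRange 0 (PySem.List.len (PySem.List.dedup arr)) 1)
        (fun i => PySem.List.pyGetD (PySem.List.dedup arr) i 0)
      = (PySem.Set.ofList (pvSortA arr)).map
          (fun x => ((List.idxOf x (PySem.Set.ofList arr) : Nat) : Int)) := by
  rw [PySem.List.dedup_eq_ofList, PySem.List.len_eq, PySem.List.pyRange_zero_natCast]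
  apply PySem.List.sorted_eq_of_perm_of_pairwise_lt
  · have h2 := (pv_perm_D_E arr).map
      (fun x => ((List.idxOf x (PySem.Set.ofList arr) : Nat) : Int))
    rw [pv_map_idx_eq_range arr] at h2
    exact h2
  · have hlt := PySem.List.sorted_ofList_pairwise_lt (xs := arr)
    rw [pv_sortedU_eq_D arr] at hlt
    rw [List.pairwise_map]
    refine hlt.imp_of_mem ?_
    intro a b ha hb hab
    have ha' : a ∈ PySem.Set.ofList arr := by
      have := (PySem.Set.mem_ofList (pvSortA arr) a).mp ha
      simpa [pvSortA, PySem.List.mem_sorted, PySem.Set.mem_ofList] using this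
    have hb' : b ∈ PySem.Set.ofList arr := by
      have := (PySem.Set.mem_ofList (pvSortA arr) b).mp hb
      simpa [pvSortA, PySem.List.mem_sorted, PySem.Set.mem_ofList] using this
    rw [pv_key_cast arr a ha', pv_key_cast arr b hb']
    exact hab

-- B computes 1 + (count of smaller distinct values) over the first-occurrence dedup
lemma pv_alt_eq (arr : List Int) :
    relation_convert_alt arr
      = (PySem.Set.ofList arr).map (fun x => ((pvCnt arr x : Nat) : Int) + 1) := by
  unfold relation_convert_alt
  rw [pv_order_eq arr, PySem.List.dedup_eq_ofList]
  set U := PySem.Set.ofList arr with hU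
  set ys := (PySem.Set.ofList (pvSortA arr)).map
      (fun x => ((List.idxOf x U : Nat) : Int)) with hys
  have hysnd : ∀ p ∈ PySem.List.enumerate ys 1,
      ∃ k : Nat, k < (List.replicate U.length (0 : Int)).length ∧ p.2 = (k : Int) := by
    intro p hp
    rw [PySem.List.mem_enumerate_iff] at hp
    obtain ⟨t, ht, hpe⟩ := hp
    subst hpe
    simp only [hys, List.getElem_map]
    refine ⟨List.idxOf ((PySem.Set.ofList (pvSortA arr))[t]'(by simpa [hys] using ht)) U, ?_, rfl⟩
    rw [List.length_replicate]
    apply List.idxOf_lt_length_of_mem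
    have hm := List.getElem_mem (by simpa [hys] using ht :
      t < (PySem.Set.ofList (pvSortA arr)).length)
    have := (PySem.Set.mem_ofList (pvSortA arr) _).mp hm
    simpa [hU, pvSortA, PySem.List.mem_sorted, PySem.Set.mem_ofList] using this
  have hnd : ((PySem.List.enumerate ys 1).map Prod.snd).Nodup := by
    rw [PySem.List.map_snd_enumerate]
    have hperm := (pv_perm_D_E arr).map (fun x => ((List.idxOf x U : Nat) : Int))
    rw [pv_map_idx_eq_range arr] at hperm
    exact hperm.nodup_iff.mpr
      (List.nodup_range.map (fun a b h => by exact_mod_cast h))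
  apply List.ext_getElem
  · rw [pv_scatter_length]; simp
  · intro j hj1 hj2
    have hjU : j < U.length := by simpa using hj2
    have hxarr : U[j] ∈ arr := (PySem.Set.mem_ofList arr _).mp (List.getElem_mem hjU)
    obtain ⟨hk, hD, _⟩ := pv_mid_spec arr (U[j]) hxarr
    have hys_c : ys[pvCnt arr U[j]]'(by simpa [hys] using hk) = (j : Int) := by
      simp only [hys, List.getElem_map]
      rw [hD, List.Nodup.idxOf_getElem (PySem.Set.nodup_ofList arr) j hjU]
    have hmem : ((1 + (pvCnt arr U[j] : Int)), (j : Int)) ∈ PySem.List.enumerate ys 1 := by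
      rw [PySem.List.mem_enumerate_iff]
      exact ⟨pvCnt arr U[j], by simpa [hys] using hk, by simp [hys_c]⟩
    have hget := pv_scatter_mem (PySem.List.enumerate ys 1)
      (List.replicate U.length 0) j (1 + (pvCnt arr U[j] : Int)) hysnd hnd hmem
    rw [PySem.List.pyGetD_natCast, List.getD_eq_getElem _ _ hj1] at hget
    rw [hget]
    simp only [List.getElem_map]
    omega
-- ===== VERDICT (by name: the statement is the Claim_ definition above) =====
theorem relation_convert_spec : Claim_equal_relation_convert := by
  intro arr _
  unfold Spec_relation_convert
  rw [pv_alt_eq]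
  unfold relation_convert
  have hcong : arr.foldl
      (fun (st : List Int × List Bool) i =>
        if PySem.List.pyGetD st.2 ((pvMidA arr).getD i 0) false = false then
          (st.1 ++ [(pvMidA arr).getD i 0],
           PySem.List.pySetD st.2 ((pvMidA arr).getD i 0) true)
        else st)
      ([], List.replicate (arr.length + 1) false)
      = arr.foldl
      (fun (st : List Int × List Bool) i =>
        if PySem.List.pyGetD st.2 (((pvCnt arr i + 1 : Nat) : Int)) false = false then
          (st.1 ++ [((pvCnt arr i + 1 : Nat) : Int)],
           PySem.List.pySetD st.2 (((pvCnt arr i + 1 : Nat) : Int)) true)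
        else st)
      ([], List.replicate (arr.length + 1) false) := by
    apply PySem.List.foldl_congr_mem
    intro acc i hi
    obtain ⟨_, _, hmid⟩ := pv_mid_spec arr i hi
    rw [hmid]
    push_cast
    ring_nf
  rw [hcong]
  have hloop := pv_loopA arr (fun x => pvCnt arr x + 1)
    (fun x hx y hy h => pv_rank_inj arr x y hx hy (by simpa using h))
    (fun x hx => by simpa using pv_rank_bound arr x hx)
    arr (fun x hx => hx) [] [] (List.replicate (arr.length + 1) false)
    (by intro x hx; cases hx)
    (by simp)
    (by intro x hx
        rw [PySem.List.pyGetD_natCast]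
        simp)
  rw [hloop]
  simp only [List.nil_append, PySem.Set.ofList, PySem.Set.empty, List.foldl_nil,
    List.length_nil, List.drop_zero]
  apply List.map_congr_left
  intro x _
  push_cast
  ring
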